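-- pv_equiv track=rewrite | github.com/leemimi/CodingTest | 프로그래머스/lv1/12915. 문자열 내 마음대로 정렬하기/문자열 내 마음대로 정렬하기.py | solution
-- ===== SOURCE A (Python) =====
-- from collections import defaultdict
-- from operator import itemgetter
--
-- def solution(strings, n):
--     answer = []
--
--     strings.sort()
--     arr = defaultdict(str)
--     for i in range(len(strings)):
--         arr[i]+=strings[i][n]
--
--     sort_value = sorted(arr.items(), key=itemgetter(1))
--
--
--
--     for idx in sort_value:
--         answer.append(strings[idx[0]])
--
--     return answer
-- ===== SOURCE B (Python) =====
-- def solution(strings, n):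
--     strings.sort()
--     buckets = {}
--     for s in strings:
--         buckets.setdefault(s[n], []).append(s)
--     answer = []
--     for c in sorted(buckets):
--         answer += buckets[c]
--     return answer
-- ===== Notes on version B (the rewrite author's own statement) =====
-- stated objective: alternative
-- what changed: Replaces A's second comparison sort (the defaultdict index->char table, its items-sort and the index-lookup reconstruction loop) with a bucket/distribution pass: group the lexicographically pre-sorted strings into a dict keyed by the nth character, then concatenate the buckets in sorted key order; strings.sort() is kept so the in-place mutation side effect matches.
import Mathlib
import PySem

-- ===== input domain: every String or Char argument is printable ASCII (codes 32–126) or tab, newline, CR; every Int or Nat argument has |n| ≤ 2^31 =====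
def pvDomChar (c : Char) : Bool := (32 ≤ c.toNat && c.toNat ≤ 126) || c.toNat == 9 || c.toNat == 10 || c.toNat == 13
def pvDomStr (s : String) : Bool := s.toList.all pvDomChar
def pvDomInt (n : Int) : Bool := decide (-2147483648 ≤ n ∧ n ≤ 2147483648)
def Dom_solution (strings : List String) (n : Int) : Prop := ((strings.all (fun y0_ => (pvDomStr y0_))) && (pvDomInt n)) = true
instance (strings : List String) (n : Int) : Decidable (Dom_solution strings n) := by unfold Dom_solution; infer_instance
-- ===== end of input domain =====

-- B replaces A's second comparison sort (defaultdict index→char table, items-sort, reconstruction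
-- loop) with a bucket pass: group the pre-sorted strings by nth char, emit buckets in key order.
-- Both A and B sort `strings` in place first; the equivalence proved is about the RETURN value
-- (the in-place sort side effect is identical).

-- s[n] as Python's one-character string (used by both ports; Pre_ keeps n in range for every string)
def pvCharAt (s : String) (n : Int) : String :=
  match PySem.Str.pyGet? s n with
  | some c => String.ofList [c]
  | none => ""

-- ===== PORT A =====
def solution (strings : List String) (n : Int) : List String :=
  let ss := PySem.List.sorted strings (fun s => s) false
  let arr := (PySem.List.pyRange 0 (PySem.List.len ss) 1).foldl
      (fun d i => d.insert i (d.getD i "" ++ pvCharAt (PySem.List.pyGetD ss i "") n))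
      (PySem.Dict.empty : PySem.Dict Int String)
  let sort_value := PySem.List.sorted arr.items (fun p => p.2) false
  sort_value.foldl (fun answer idx => answer ++ [PySem.List.pyGetD ss idx.1 ""]) []

-- ===== PORT B =====
def solution_alt (strings : List String) (n : Int) : List String :=
  let ss := PySem.List.sorted strings (fun s => s) false
  let buckets := ss.foldl
      (fun d s => d.modify (pvCharAt s n) [] (fun l => l ++ [s]))
      (PySem.Dict.empty : PySem.Dict String (List String))
  (PySem.List.sorted buckets.keys (fun c => c) false).foldl
      (fun answer c => answer ++ buckets.getD c []) []

-- ===== PRECONDITION & SPEC =====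
-- Pre_ excludes exactly the inputs where Python A raises IndexError on strings[i][n]
def Pre_solution (strings : List String) (n : Int) : Prop :=
  ∀ s ∈ strings, PySem.Raise.InRange s.toList.length n
instance (strings : List String) (n : Int) : Decidable (Pre_solution strings n) := by unfold Pre_solution; infer_instance
def pvWitness_solution : List String × Int := (["ba", "ab", "bb"], 1)

def Spec_solution (strings : List String) (n : Int) (out : List String) : Prop := out = solution_alt strings n
instance (strings : List String) (n : Int) (out : List String) : Decidable (Spec_solution strings n out) := by unfold Spec_solution; infer_instance

-- ===== CLAIM (what is proved, stated in full; the proofs are below) =====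
def Claim_equal_solution : Prop := ∀ (strings : List String) (n : Int), Dom_solution strings n → Pre_solution strings n → Spec_solution strings n (solution strings n)

-- ===== LEMMAS AND PROOFS =====

-- the dict-building loop over fresh increasing keys: items come out as the enumerated key list
theorem pv_dict_loop (xs : List String) (f : String → String) :
    ∀ (s : Int) (d : PySem.Dict Int String), (∀ j : Int, s ≤ j → d.contains j = false) →
    ((PySem.List.enumerate xs s).foldl (fun d p => d.insert p.1 (d.getD p.1 "" ++ f p.2)) d).items
      = d.items ++ (PySem.List.enumerate xs s).map (fun p => (p.1, f p.2)) := by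
  induction xs with
  | nil => intro s d _; simp [PySem.List.enumerate]
  | cons x xs ih =>
    intro s d h
    rw [PySem.List.enumerate_cons]
    simp only [List.foldl_cons, List.map_cons]
    have hc : d.contains s = false := h s le_rfl
    rw [PySem.Dict.getD_of_not_contains d "" hc]
    have hstep := ih (s + 1) (d.insert s ("" ++ f x)) (by
      intro j hj
      rw [PySem.Dict.contains_insert]
      have : (j == s) = false := by simp; omega
      rw [this, Bool.false_or]
      exact h j (by omega))
    rw [hstep, PySem.Dict.items_insert_of_not_contains d _ hc]
    simp

-- insertBy commutes with a map that preserves the comparison against the list's elements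
theorem pv_insertBy_map {α β : Type} (π : α → β) (bef : β → β → Bool) (bef' : α → α → Bool)
    (x : α) (ys : List α) (h : ∀ y ∈ ys, bef (π x) (π y) = bef' x y) :
    PySem.List.insertBy bef (π x) (ys.map π) = (PySem.List.insertBy bef' x ys).map π := by
  induction ys with
  | nil => simp [PySem.List.insertBy]
  | cons y ys ih =>
    simp only [List.map_cons, PySem.List.insertBy]
    rw [h y (by simp)]
    by_cases hb : bef' x y = true
    · simp [hb]
    · simp only [hb, Bool.false_eq_true, if_false, List.map_cons]
      rw [ih (fun z hz => h z (by simp [hz]))]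

-- a stable key-sort commutes with a map when the keys agree on the list's elements
theorem pv_sorted_map {α β κ : Type} [LinearOrder κ] (π : α → β) (ka : α → κ) (kb : β → κ) :
    ∀ (xs acc : List α), (∀ y ∈ xs ++ acc, kb (π y) = ka y) →
    xs.foldl (fun a x => PySem.List.insertBy (fun a b => decide (kb a < kb b)) (π x) a) (acc.map π)
      = (xs.foldl (fun a x => PySem.List.insertBy (fun a b => decide (ka a < ka b)) x a) acc).map π := by
  intro xs
  induction xs with
  | nil => intro acc _; simp
  | cons x xs ih =>
    intro acc h
    simp only [List.foldl_cons]
    rw [pv_insertBy_map π _ _ x acc (by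
      intro y hy
      rw [h x (by simp), h y (by simp [hy])])]
    exact ih _ (by
      intro y hy
      rcases List.mem_append.mp hy with hy | hy
      · exact h y (by simp [hy])
      · rcases (PySem.List.mem_insertBy _ x y acc).mp hy with rfl | hy
        · exact h y (by simp)
        · exact h y (by simp [hy]))

-- insertBy walks past a prefix none of whose elements come after x
theorem pv_insertBy_append {α : Type} (bef : α → α → Bool) (x : α) (as bs : List α)
    (h : ∀ y ∈ as, bef x y = false) :
    PySem.List.insertBy bef x (as ++ bs) = as ++ PySem.List.insertBy bef x bs := by
  induction as with
  | nil => simp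
  | cons a as ih =>
    simp only [List.cons_append, PySem.List.insertBy, h a (by simp)]
    simp only [Bool.false_eq_true, if_false]
    rw [ih (fun y hy => h y (by simp [hy]))]

-- insertBy puts x in front when every element comes after it
theorem pv_insertBy_front {α : Type} (bef : α → α → Bool) (x : α) (l : List α)
    (h : ∀ y ∈ l, bef x y = true) :
    PySem.List.insertBy bef x l = x :: l := by
  cases l with
  | nil => simp [PySem.List.insertBy]
  | cons a as => simp [PySem.List.insertBy, h a (by simp)]

-- inserting an element whose key is already in the strictly increasing key list K
-- appends it to its bucket
theorem pv_insert_bucket_mem {α : Type} (key : α → String) (x : α) :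
    ∀ (K : List String) (g : String → List α), K.Pairwise (· < ·) →
    (∀ c ∈ K, ∀ y ∈ g c, key y = c) → key x ∈ K →
    PySem.List.insertBy (fun a b => decide (key a < key b)) x (K.flatMap g)
      = K.flatMap (fun c => if c = key x then g c ++ [x] else g c) := by
  intro K
  induction K with
  | nil => intro g _ _ hk; simp at hk
  | cons c K ih =>
    intro g hp hg hk
    have hpc : ∀ c' ∈ K, c < c' := List.pairwise_cons.mp hp |>.1
    simp only [List.flatMap_cons]
    rcases lt_trichotomy c (key x) with hlt | heq | hgt
    · -- c < key x : walk past bucket c, recurse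
      have hk' : key x ∈ K := by
        rcases List.mem_cons.mp hk with h | h
        · exact absurd h.symm (ne_of_lt hlt)
        · exact h
      rw [pv_insertBy_append _ x (g c) _ (by
        intro y hy
        have := hg c (by simp) y hy
        simp [this, not_lt_of_gt hlt])]
      rw [ih g (List.pairwise_cons.mp hp).2 (fun c' hc' => hg c' (by simp [hc'])) hk']
      have : ¬ c = key x := ne_of_lt hlt
      simp [this]
    · -- c = key x : walk past bucket c, then insert in front of the rest
      subst heq
      rw [pv_insertBy_append _ x (g (key x)) _ (by
        intro y hy
        simp [hg (key x) (by simp) y hy])]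
      rw [pv_insertBy_front _ x (K.flatMap g) (by
        intro y hy
        obtain ⟨c', hc', hyc⟩ := List.mem_flatMap.mp hy
        have := hg c' (by simp [hc']) y hyc
        simp [this, hpc c' hc'])]
      have hrest : (K.flatMap fun c' => if c' = key x then g c' ++ [x] else g c')
          = K.flatMap g := by
        apply List.flatMap_congr
        intro c' hc'
        have : ¬ c' = key x := ne_of_gt (hpc c' hc')
        simp [this]
      simp [hrest]
    · -- key x < c : impossible since key x ∈ c :: K and all of K exceeds c
      exfalso
      rcases List.mem_cons.mp hk with h | h
      · exact absurd h.symm (ne_of_gt hgt)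
      · exact absurd (hpc _ h) (lt_asymm hgt)

-- inserting an element with a fresh key inserts a new singleton bucket at the key's sorted place
theorem pv_insert_bucket_new {α : Type} (key : α → String) (x : α) :
    ∀ (K : List String) (g : String → List α), K.Pairwise (· < ·) →
    (∀ c ∈ K, ∀ y ∈ g c, key y = c) → (∀ c ∈ K, c ≠ key x) →
    PySem.List.insertBy (fun a b => decide (key a < key b)) x (K.flatMap g)
      = (PySem.List.insertBy (fun a b => decide (a < b)) (key x) K).flatMap
          (fun c => if c = key x then [x] else g c) := by
  intro K
  induction K with
  | nil => simp [PySem.List.insertBy]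
  | cons c K ih =>
    intro g hp hg hne
    have hpc : ∀ c' ∈ K, c < c' := List.pairwise_cons.mp hp |>.1
    have hcne : c ≠ key x := hne c (by simp)
    rcases lt_or_gt_of_ne hcne with hlt | hgt
    · -- c < key x
      simp only [List.flatMap_cons, PySem.List.insertBy]
      have hd : decide (key x < c) = false := by simp [not_lt_of_gt hlt]
      simp only [hd, Bool.false_eq_true, if_false]
      rw [pv_insertBy_append _ x (g c) _ (by
        intro y hy
        have := hg c (by simp) y hy
        simp [this, not_lt_of_gt hlt])]
      rw [ih g (List.pairwise_cons.mp hp).2 (fun c' hc' => hg c' (by simp [hc']))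
          (fun c' hc' => hne c' (by simp [hc']))]
      simp [List.flatMap_cons, hcne]
    · -- key x < c : x goes in front, key x goes in front of K
      simp only [PySem.List.insertBy]
      have h1 : decide (key x < c) = true := by simp [hgt]
      rw [pv_insertBy_front _ x ((c :: K).flatMap g) (by
        intro y hy
        obtain ⟨c', hc', hyc⟩ := List.mem_flatMap.mp hy
        have hk' := hg c' hc' y hyc
        have hlt' : key x < c' := by
          rcases List.mem_cons.mp hc' with rfl | h
          · exact hgt
          · exact lt_trans hgt (hpc c' h)
        simp [hk', hlt'])]
      simp only [h1, if_true, List.flatMap_cons]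
      have hrest : ((c :: K).flatMap fun c' => if c' = key x then [x] else g c')
          = (c :: K).flatMap g := by
        apply List.flatMap_congr
        intro c' hc'
        simp [hne c' hc']
      simpa [List.flatMap_cons] using hrest.symm

-- a stable key-sort is the concatenation of the key-buckets in sorted key order
theorem pv_sorted_eq_buckets {α : Type} [DecidableEq α] (key : α → String) (xs : List α) :
    PySem.List.sorted xs key false
      = (PySem.List.sorted (PySem.Set.ofList (xs.map key)) (fun c => c) false).flatMap
          (fun c => xs.filter (fun x => key x == c)) := by
  induction xs using List.reverseRecOn with
  | nil => simp [PySem.List.sorted]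
  | append_singleton xs x ih =>
    have hins : PySem.List.sorted (xs ++ [x]) key false
        = PySem.List.insertBy (fun a b => decide (key a < key b)) x
            (PySem.List.sorted xs key false) := by
      rw [PySem.List.sorted_eq_foldl_insertBy, PySem.List.sorted_eq_foldl_insertBy,
          List.foldl_append]
      simp
    have hKP : (PySem.List.sorted (PySem.Set.ofList (xs.map key)) (fun c => c) false).Pairwise
        (· < ·) := PySem.List.sorted_ofList_pairwise_lt _
    have hKmem : ∀ c, c ∈ PySem.List.sorted (PySem.Set.ofList (xs.map key)) (fun c => c) false
        ↔ c ∈ xs.map key := by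
      intro c
      rw [PySem.List.mem_sorted]
      exact PySem.Set.mem_ofList _ _
    have hg : ∀ c ∈ PySem.List.sorted (PySem.Set.ofList (xs.map key)) (fun c => c) false,
        ∀ y ∈ xs.filter (fun z => key z == c), key y = c := by
      intro c _ y hy
      exact eq_of_beq (List.mem_filter.mp hy).2
    have hfilter : ∀ c, (xs ++ [x]).filter (fun z => key z == c)
        = xs.filter (fun z => key z == c) ++ (if c = key x then [x] else []) := by
      intro c
      rw [List.filter_append]
      by_cases h : key x = c
      · simp [List.filter, h]
      · have hb : (key x == c) = false := by simp [h]
        simp [List.filter, hb, Ne.symm h]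
    rw [hins, ih, List.map_append, List.map_singleton, PySem.Set.ofList_append_singleton]
    by_cases hmem : key x ∈ xs.map key
    · -- the key already occurs: the key set (hence its sorted order) is unchanged,
      -- x is appended to its bucket
      rw [PySem.Set.add_of_mem ((Iff.mpr (PySem.Set.mem_ofList _ _) hmem))]
      rw [pv_insert_bucket_mem key x _ _ hKP hg ((Iff.mpr (hKmem (key x)) hmem))]
      apply List.flatMap_congr
      intro c _
      rw [hfilter c]
      by_cases h : c = key x <;> simp [h]
    · -- a fresh key: it is inserted at its sorted place with a singleton bucket
      rw [PySem.Set.add_of_not_mem (fun h => hmem (Iff.mp (PySem.Set.mem_ofList _ _) h))]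
      have hsortins : PySem.List.sorted (PySem.Set.ofList (xs.map key) ++ [key x])
            (fun c => c) false
          = PySem.List.insertBy (fun a b => decide (a < b)) (key x)
              (PySem.List.sorted (PySem.Set.ofList (xs.map key)) (fun c => c) false) := by
        rw [PySem.List.sorted_eq_foldl_insertBy, PySem.List.sorted_eq_foldl_insertBy,
            List.foldl_append]
        simp
      rw [hsortins, pv_insert_bucket_new key x _ _ hKP hg (by
        intro c hc h
        exact hmem (Iff.mp (hKmem (key x)) (h ▸ hc)))]
      apply List.flatMap_congr
      intro c _
      rw [hfilter c]
      by_cases h : c = key x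
      · subst h
        have hnil : xs.filter (fun z => key z == key x) = [] := by
          rw [List.filter_eq_nil_iff]
          intro z hz hbe
          apply hmem
          rw [← eq_of_beq hbe]
          exact List.mem_map_of_mem hz
        simp [hnil]
      · simp [h]

-- ===== VERDICT (by name: the statement is the Claim_ definition above) =====
theorem solution_spec : Claim_equal_solution := by
  intro strings n _ hpre
  unfold Spec_solution solution solution_alt
  dsimp only
  set ss := PySem.List.sorted strings (fun s => s) false with hss
  have hpre' : ∀ s ∈ ss, PySem.Raise.InRange s.toList.length n := by
    intro s hs
    exact hpre s ((PySem.List.mem_sorted strings _ false s).mp hs)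
  -- ---- B's side: the bucket dict groups ss by the nth character ----
  set bdict := ss.foldl (fun d s => d.modify (pvCharAt s n) [] (fun l => l ++ [s]))
      (PySem.Dict.empty : PySem.Dict String (List String)) with hbd
  have hbfold : bdict = (ss.map (fun s => (pvCharAt s n, s))).foldl
      (fun d p => d.modify p.1 [] (fun l => l ++ [p.2]))
      (PySem.Dict.empty : PySem.Dict String (List String)) := by
    rw [hbd, List.foldl_map]
  have hgetD : ∀ c, bdict.getD c [] = ss.filter (fun s => pvCharAt s n == c) := by
    intro c
    rw [hbfold, PySem.Dict.getD_foldl_modify_append, PySem.Dict.getD_empty, List.nil_append,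
        List.filter_map, List.map_map]
    simp [Function.comp_def]
  have hkeys : bdict.keys = PySem.Set.ofList (ss.map (fun s => pvCharAt s n)) := by
    rw [hbd, PySem.Dict.keys_foldl_modify_key]
    rw [PySem.Dict.keys_empty, PySem.Set.update_nil_left]
  have hB : (PySem.List.sorted bdict.keys (fun c => c) false).foldl
        (fun answer c => answer ++ bdict.getD c []) []
      = PySem.List.sorted ss (fun s => pvCharAt s n) false := by
    rw [PySem.List.foldl_append_eq_flatMap, List.nil_append, hkeys]
    simp only [hgetD]
    exact (pv_sorted_eq_buckets (fun s => pvCharAt s n) ss).symm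
  rw [hB]
  -- ---- A's side: the index table sorted by value reconstructs the same stable key-sort ----
  have hfold :
      (PySem.List.pyRange 0 (PySem.List.len ss) 1).foldl
        (fun d i => d.insert i (d.getD i "" ++ pvCharAt (PySem.List.pyGetD ss i "") n))
        (PySem.Dict.empty : PySem.Dict Int String)
      = (PySem.List.enumerate ss 0).foldl
          (fun d p => d.insert p.1 (d.getD p.1 "" ++ pvCharAt p.2 n))
          (PySem.Dict.empty : PySem.Dict Int String) := by
    rw [PySem.List.enumerate_eq_map_pyRange ss "", List.foldl_map]
  rw [hfold, pv_dict_loop ss (fun s => pvCharAt s n) 0 PySem.Dict.empty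
      (fun j _ => PySem.Dict.contains_empty j)]
  simp only [PySem.Dict.empty, List.nil_append]
  rw [PySem.List.foldl_append_singleton_eq_map (fun idx : Int × String => PySem.List.pyGetD ss idx.1 ""),
      List.nil_append]
  set pairs := (PySem.List.enumerate ss 0).map (fun p => (p.1, pvCharAt p.2 n)) with hpairs
  have hmapπ : pairs.map (fun idx : Int × String => PySem.List.pyGetD ss idx.1 "") = ss := by
    rw [hpairs, List.map_map]
    have := PySem.List.map_pyGetD_pyRange_zero ss ""
    rw [PySem.List.enumerate_eq_map_pyRange ss "", List.map_map]
    exact this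
  have hkeysagree : ∀ p ∈ pairs ++ ([] : List (Int × String)),
      pvCharAt (PySem.List.pyGetD ss p.1 "") n = p.2 := by
    intro p hp
    simp only [List.append_nil, hpairs, List.mem_map] at hp
    obtain ⟨q, hq, rfl⟩ := hp
    obtain ⟨k, hk, rfl⟩ := (PySem.List.mem_enumerate_iff ss 0 q).mp hq
    simp [PySem.List.pyGetD_natCast, List.getElem?_eq_getElem hk]
  calc (PySem.List.sorted pairs (fun p => p.2) false).map
          (fun idx : Int × String => PySem.List.pyGetD ss idx.1 "")
      = PySem.List.sorted (pairs.map (fun idx : Int × String => PySem.List.pyGetD ss idx.1 ""))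
          (fun s => pvCharAt s n) false := by
        rw [PySem.List.sorted_eq_foldl_insertBy pairs, PySem.List.sorted_eq_foldl_insertBy
            (pairs.map (fun idx : Int × String => PySem.List.pyGetD ss idx.1 ""))]
        conv_rhs => rw [List.foldl_map]
        exact (pv_sorted_map (fun idx : Int × String => PySem.List.pyGetD ss idx.1 "")
          (fun p => p.2) (fun s => pvCharAt s n) pairs [] hkeysagree).symm
    _ = PySem.List.sorted ss (fun s => pvCharAt s n) false := by rw [hmapπ]
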